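-- pv_equiv track=rewrite | github.com/okhee/BOJ | level_simulation/12100.py | rowMove
-- ===== SOURCE A (Python) =====
-- def rowMove(col):
--     tmp = [0 for i in range(len(col))]
--     canMerge = True
--     lastNum = 0
--     j = 0
--
--     for i in range(len(col)):
--         if col[i] == 0:
--             continue
--
--         # if number matches and can be merged, ...
--         # lastNum > 0 guarantees tmp[j-1] is valid
--         if lastNum == col[i] and canMerge:
--             tmp[j-1] = 2 * col[i]
--             # No consecutive merging
--             canMerge = False
--
--         # No match or no merging,
--         else:
--             tmp[j] = col[i]
--             lastNum = col[i]
--             # restore canMerge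
--             canMerge = True
--             j += 1
--
--     return tmp
-- ===== SOURCE B (Python) =====
-- def rowMove(col):
--     nums = [x for x in col if x != 0]
--     n = len(nums)
--     res = []
--     i = 0
--     while i < n:
--         x = nums[i]
--         if i + 1 < n and nums[i + 1] == x:
--             res.append(2 * x)
--             i += 2
--         else:
--             res.append(x)
--             i += 1
--     res.extend([0] * (len(col) - len(res)))
--     return res
-- ===== Notes on version B (the rewrite author's own statement) =====
-- stated objective: simpler
-- what changed: Replaces A's single stateful pass with a canMerge/lastNum flag machine writing into a preallocated zero buffer by a two-phase pipeline: filter out zeros, then greedily merge adjacent equal pairs in one scan, then pad with zeros.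
import Mathlib
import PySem

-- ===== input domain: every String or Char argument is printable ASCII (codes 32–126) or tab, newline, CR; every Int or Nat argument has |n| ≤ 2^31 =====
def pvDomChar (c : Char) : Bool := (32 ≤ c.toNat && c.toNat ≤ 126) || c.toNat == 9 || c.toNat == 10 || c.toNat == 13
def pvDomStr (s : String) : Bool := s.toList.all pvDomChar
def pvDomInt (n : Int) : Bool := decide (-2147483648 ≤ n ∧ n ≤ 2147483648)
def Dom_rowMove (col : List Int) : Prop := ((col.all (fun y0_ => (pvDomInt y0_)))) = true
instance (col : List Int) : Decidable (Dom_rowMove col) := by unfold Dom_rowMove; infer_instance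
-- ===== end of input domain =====

-- B replaces A's single stateful flag-machine pass by filter-zeros / merge-adjacent-pairs / pad (objective: simpler).

-- ===== PORT A =====
-- One step of A's loop body; state = (tmp, canMerge, lastNum, j).
-- In the merge branch j ≥ 1 is guaranteed (A's own comment: lastNum > 0 makes tmp[j-1] valid,
-- since lastNum = col[i] ≠ 0 implies an element was already placed), so Nat j-1 matches Python's j-1.
def rowMoveStep (s : List Int × Bool × Int × Nat) (c : Int) : List Int × Bool × Int × Nat :=
  match s with
  | (tmp, canMerge, lastNum, j) =>
    if c == 0 then (tmp, canMerge, lastNum, j)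
    else if lastNum == c && canMerge then (tmp.set (j - 1) (2 * c), false, lastNum, j)
    else (tmp.set j c, true, c, j + 1)

def rowMove (col : List Int) : List Int :=
  (col.foldl rowMoveStep (List.replicate col.length 0, true, (0 : Int), (0 : Nat))).1

-- ===== PORT B =====
-- Source B's while-loop scan over nums, merging adjacent equal pairs (advance 2 on merge, 1 otherwise).
def mergePairs : List Int → List Int
  | [] => []
  | [x] => [x]
  | x :: y :: r => if x == y then 2 * x :: mergePairs r else x :: mergePairs (y :: r)

def rowMove_alt (col : List Int) : List Int :=
  let nums := col.filter (fun x => x != 0)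
  let res := mergePairs nums
  res ++ List.replicate (col.length - res.length) 0

-- ===== PRECONDITION & SPEC =====
def Spec_rowMove (col : List Int) (out : List Int) : Prop := out = rowMove_alt col
instance (col : List Int) (out : List Int) : Decidable (Spec_rowMove col out) := by unfold Spec_rowMove; infer_instance

-- ===== CLAIM (what is proved, stated in full; the proofs are below) =====
def Claim_equal_rowMove : Prop := ∀ (col : List Int), Dom_rowMove col → Spec_rowMove col (rowMove col)

-- ===== LEMMAS AND PROOFS =====

lemma mergePairs_len_le : ∀ l : List Int, (mergePairs l).length ≤ l.length
  | [] => by simp [mergePairs]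
  | [x] => by simp [mergePairs]
  | x :: y :: r => by
    simp only [mergePairs]
    split_ifs with h
    · have := mergePairs_len_le r; simp; omega
    · have := mergePairs_len_le (y :: r); simp at this ⊢; omega

-- zeros in the input are skipped by A's loop
lemma foldl_step_filter (l : List Int) : ∀ s,
    List.foldl rowMoveStep s l = List.foldl rowMoveStep s (l.filter (fun x => x != 0)) := by
  induction l with
  | nil => intro s; rfl
  | cons c t ih =>
    intro s
    by_cases hc : c = 0
    · obtain ⟨tmp, b, a, j⟩ := s
      simp [hc, rowMoveStep, List.filter, ih]
    · simp only [List.filter]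
      have : (c != 0) = true := by simp [hc]
      rw [this]
      simp only [List.foldl_cons, ih]

-- main invariant: S_false and S_true (from a fresh/blocked state, resp. with a pending mergeable x)
lemma loop_inv : ∀ l : List Int, (∀ x ∈ l, x ≠ 0) →
    (∀ (b : Bool) (a : Int) (w : List Int) (k : Nat), (b = false ∨ a = 0) → l.length ≤ k →
      (List.foldl rowMoveStep (w ++ List.replicate k 0, b, a, w.length) l).1
        = w ++ mergePairs l ++ List.replicate (k - (mergePairs l).length) 0)
    ∧ (∀ (x : Int) (w : List Int) (k : Nat), x ≠ 0 → l.length ≤ k →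
      (List.foldl rowMoveStep ((w ++ [x]) ++ List.replicate k 0, true, x, w.length + 1) l).1
        = w ++ mergePairs (x :: l) ++ List.replicate (k + 1 - (mergePairs (x :: l)).length) 0) := by
  intro l
  induction l with
  | nil =>
    intro _
    constructor
    · intro b a w k _ _; simp [mergePairs]
    · intro x w k _ _; simp [mergePairs]
  | cons c t ih =>
    intro hnz
    have hc : c ≠ 0 := hnz c (by simp)
    have hnzt : ∀ x ∈ t, x ≠ 0 := fun x hx => hnz x (by simp [hx])
    obtain ⟨ihF, ihT⟩ := ih hnzt
    constructor
    · -- S_false at c :: t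
      intro b a w k hba hk
      simp only [List.length_cons] at hk
      have hk1 : 1 ≤ k := by omega
      have hbranch : (a == c && b) = false := by
        rcases hba with hb | ha
        · simp [hb]
        · subst ha; simp [show (0:Int) ≠ c from fun h => hc h.symm]
      simp only [List.foldl_cons, rowMoveStep]
      rw [if_neg (by simp [hc]), hbranch]
      simp only [Bool.false_eq_true, if_false]
      -- set at index w.length in w ++ replicate k 0
      have hset : (w ++ List.replicate k 0).set w.length c
          = (w ++ [c]) ++ List.replicate (k - 1) 0 := by
        rw [List.set_append_right _ _ (le_refl _)]
        simp only [Nat.sub_self]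
        cases k with
        | zero => omega
        | succ m => simp [List.replicate_succ, List.append_assoc]
      rw [hset]
      have := ihT c w (k - 1) hc (by omega)
      rw [this]
      have hm := mergePairs_len_le t
      have : k - 1 + 1 = k := by omega
      rw [this]
    · -- S_true at c :: t with pending x
      intro x w k hx hk
      simp only [List.length_cons] at hk
      have hk1 : 1 ≤ k := by omega
      simp only [List.foldl_cons, rowMoveStep]
      rw [if_neg (by simp [hc])]
      by_cases hxy : x = c
      · -- merge: overwrite w's slot for x with 2*c, block further merging
        rw [if_pos (by simp [hxy])]
        have hset : ((w ++ [x]) ++ List.replicate k 0).set (w.length + 1 - 1) (2 * c)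
            = (w ++ [2 * c]) ++ List.replicate k 0 := by
          simp only [Nat.add_sub_cancel, List.append_assoc]
          rw [List.set_append_right _ _ (le_refl _)]
          simp
        rw [hset]
        have := ihF false x (w ++ [2 * c]) k (Or.inl rfl) (by omega)
        simp only [List.length_append, List.length_cons, List.length_nil] at this ⊢
        rw [this]
        have hm := mergePairs_len_le t
        simp only [mergePairs, if_pos (by simp [hxy] : (x == c) = true)]
        simp only [List.append_assoc, List.cons_append, List.nil_append, List.length_cons]
        have : k + 1 - ((mergePairs t).length + 1) = k - (mergePairs t).length := by omega
        rw [this, hxy]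
      · -- no merge: place c in the next free slot
        rw [if_neg (by simp [hxy])]
        have hset : ((w ++ [x]) ++ List.replicate k 0).set (w.length + 1) c
            = ((w ++ [x]) ++ [c]) ++ List.replicate (k - 1) 0 := by
          rw [List.set_append_right _ _ (by simp)]
          simp only [List.length_append, List.length_cons, List.length_nil]
          have : w.length + 1 - (w.length + 1) = 0 := by omega
          rw [this]
          cases k with
          | zero => omega
          | succ m => simp [List.replicate_succ, List.append_assoc]
        rw [hset]
        have := ihT c (w ++ [x]) (k - 1) hc (by omega)
        simp only [List.length_append, List.length_cons, List.length_nil] at this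
        rw [this]
        have hm := mergePairs_len_le t
        have hm2 := mergePairs_len_le (c :: t)
        simp only [mergePairs, if_neg (by simp [hxy] : ¬ (x == c) = true)]
        simp only [List.append_assoc, List.cons_append, List.nil_append, List.length_cons]
        have : k - 1 + 1 - (mergePairs (c :: t)).length = k + 1 - ((mergePairs (c :: t)).length + 1) := by
          omega
        rw [this]

-- ===== VERDICT (by name: the statement is the Claim_ definition above) =====
theorem rowMove_spec : Claim_equal_rowMove := by
  intro col _
  unfold Spec_rowMove rowMove rowMove_alt
  rw [foldl_step_filter]
  set nums := col.filter (fun x => x != 0) with hnums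
  have hnz : ∀ x ∈ nums, x ≠ 0 := by
    intro x hx
    rw [hnums] at hx
    simpa using (List.of_mem_filter hx)
  have hlen : nums.length ≤ col.length := by
    rw [hnums]; exact List.length_filter_le _ _
  have h := (loop_inv nums hnz).1 true 0 [] col.length (Or.inr rfl) hlen
  simpa using h
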